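-- pv_equiv track=rewrite | github.com/rouskinlab/dreem | dreem/demultiplex/main.py | bin_positions
-- ===== SOURCE A (Python) =====
-- def bin_positions(positions):
--     """Turns a list of positions into a dictionary of bins."""
--     bins = {}
--     for pos in positions:
--         if pos not in bins:
--             bins[pos] = 0
--         bins[pos] += 1
--     bins = {k: bins[k] for k in sorted(bins)}
--     return bins
-- ===== SOURCE B (Python) =====
-- def bin_positions(positions):
--     """Turns a list of positions into a dictionary of bins."""
--     s = sorted(positions)
--     bins = {}
--     i = 0
--     n = len(s)
--     while i < n:
--         v = s[i]
--         j = i + 1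
--         while j < n and s[j] == v:
--             j += 1
--         bins[v] = j - i
--         i = j
--     return bins
-- ===== Notes on version B (the rewrite author's own statement) =====
-- stated objective: alternative
-- what changed: Instead of counting into a dict and then re-sorting the keys, B sorts the positions once and makes a single pass grouping consecutive equal runs, emitting each (value, run-length) pair so the dict is built already in sorted key order.
import Mathlib
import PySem

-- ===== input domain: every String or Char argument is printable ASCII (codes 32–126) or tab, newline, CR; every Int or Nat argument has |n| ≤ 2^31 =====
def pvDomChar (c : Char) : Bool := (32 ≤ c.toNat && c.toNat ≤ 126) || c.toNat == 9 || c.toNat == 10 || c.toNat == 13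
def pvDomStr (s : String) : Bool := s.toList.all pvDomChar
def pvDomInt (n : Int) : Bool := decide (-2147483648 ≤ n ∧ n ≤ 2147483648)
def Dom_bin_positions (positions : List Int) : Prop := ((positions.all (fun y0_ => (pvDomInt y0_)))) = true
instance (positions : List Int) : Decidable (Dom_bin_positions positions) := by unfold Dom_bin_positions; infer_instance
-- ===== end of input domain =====

-- B replaces count-then-sort-keys by sort-then-group-consecutive-runs (alternative decomposition, same results).


-- ===== PORT A =====
-- counting loop into a dict, then a dict comprehension over the sorted keys
def bin_positions (positions : List Int) : List (Int × Int) :=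
  let bins : PySem.Dict Int Int := positions.foldl (fun bins pos =>
      let bins := if bins.contains pos = false then bins.insert pos 0 else bins
      bins.insert pos (bins.getD pos 0 + 1)) PySem.Dict.empty
  -- bins[pos] += 1 is ported with getD: the key is always present at that point, so no KeyError arises
  ((PySem.List.sorted bins.keys (fun x => x) false).foldl
      (fun d k => d.insert k (bins.getD k 0)) (PySem.Dict.empty : PySem.Dict Int Int)).items

-- ===== PORT B =====
-- the inner while loop scanning the run of s[i] is the takeWhile/dropWhile split; bins[v] = j - i is the run length
def groupRuns : List Int → List (Int × Int)
  | [] => []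
  | x :: xs =>
      (x, 1 + ((xs.takeWhile (fun y => y == x)).length : Int)) ::
        groupRuns (xs.dropWhile (fun y => y == x))
termination_by l => l.length
decreasing_by
  simp only [List.length_cons]
  exact Nat.lt_succ_of_le (xs.length_dropWhile_le _)

def bin_positions_alt (positions : List Int) : List (Int × Int) :=
  groupRuns (PySem.List.sorted positions (fun x => x) false)

-- ===== PRECONDITION & SPEC =====
def Spec_bin_positions (positions : List Int) (out : List (Int × Int)) : Prop := out = bin_positions_alt positions
instance (positions : List Int) (out : List (Int × Int)) : Decidable (Spec_bin_positions positions out) := by unfold Spec_bin_positions; infer_instance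

-- ===== CLAIM (what is proved, stated in full; the proofs are below) =====
def Claim_equal_bin_positions : Prop := ∀ (positions : List Int), Dom_bin_positions positions → Spec_bin_positions positions (bin_positions positions)

-- ===== LEMMAS AND PROOFS =====

-- every element surviving dropWhile (== x) in a sorted list bounded below by x is strictly above x
lemma dropWhile_gt (x : Int) : ∀ (xs : List Int), (∀ y ∈ xs, x ≤ y) → xs.Pairwise (· ≤ ·) →
    ∀ k ∈ xs.dropWhile (fun y => y == x), x < k := by
  intro xs
  induction xs with
  | nil => intro _ _ k hk; simp at hk
  | cons y ys ih =>
    intro hle hp k hk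
    rw [List.dropWhile_cons] at hk
    by_cases hy : (y == x) = true
    · rw [if_pos hy] at hk
      exact ih (fun z hz => hle z (List.mem_cons_of_mem _ hz)) (List.Pairwise.of_cons hp) k hk
    · rw [if_neg hy] at hk
      have hxy : x ≤ y := hle y List.mem_cons_self
      have hxy' : x < y := lt_of_le_of_ne hxy (fun h => hy (by simp [h.symm]))
      rcases List.mem_cons.mp hk with rfl | hk
      · exact hxy'
      · exact lt_of_lt_of_le hxy' ((List.pairwise_cons.mp hp).1 k hk)

lemma count_takeWhile_eq_length (x : Int) (xs : List Int) :
    (xs.takeWhile (fun y => y == x)).count x = (xs.takeWhile (fun y => y == x)).length := by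
  apply List.count_eq_length.mpr
  intro b hb
  have h := List.mem_takeWhile_imp (p := fun y => y == x) hb
  exact (eq_of_beq h).symm

lemma count_split (x k : Int) (xs : List Int) :
    xs.count k = (xs.takeWhile (fun y => y == x)).count k
      + (xs.dropWhile (fun y => y == x)).count k := by
  conv_lhs => rw [← List.takeWhile_append_dropWhile (p := fun y => y == x) (l := xs)]
  rw [List.count_append]

lemma count_head_sorted (x : Int) (xs : List Int) (hle : ∀ y ∈ xs, x ≤ y)
    (hp : xs.Pairwise (· ≤ ·)) :
    ((x :: xs).count x : Int) = 1 + ((xs.takeWhile (fun y => y == x)).length : Int) := by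
  have hdw : (xs.dropWhile (fun y => y == x)).count x = 0 := by
    apply List.count_eq_zero.mpr
    intro hmem
    exact absurd rfl (ne_of_gt (dropWhile_gt x xs hle hp x hmem))
  have h : (x :: xs).count x = 1 + (xs.takeWhile (fun y => y == x)).length := by
    rw [List.count_cons_self, count_split x x xs, hdw, count_takeWhile_eq_length]
    omega
  rw [h]; push_cast; ring

lemma count_tail_sorted (x k : Int) (xs : List Int) (hle : ∀ y ∈ xs, x ≤ y)
    (hp : xs.Pairwise (· ≤ ·)) (hk : k ∈ xs.dropWhile (fun y => y == x)) :
    (xs.dropWhile (fun y => y == x)).count k = (x :: xs).count k := by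
  have hxk : x < k := dropWhile_gt x xs hle hp k hk
  have htw : (xs.takeWhile (fun y => y == x)).count k = 0 := by
    apply List.count_eq_zero.mpr
    intro hmem
    have h := eq_of_beq (List.mem_takeWhile_imp (p := fun y => y == x) hmem)
    omega
  rw [List.count_cons_of_ne (by omega), count_split x k xs, htw]
  omega

-- membership in groupRuns keys = membership in the list
lemma mem_map_fst_groupRuns : ∀ (l : List Int) (k : Int),
    k ∈ (groupRuns l).map Prod.fst ↔ k ∈ l := by
  intro l
  induction l using groupRuns.induct with
  | case1 => intro k; simp [groupRuns]
  | case2 x xs ih =>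
    intro k
    rw [groupRuns]
    simp only [List.map_cons, List.mem_cons, ih]
    constructor
    · rintro (rfl | hk)
      · exact Or.inl rfl
      · exact Or.inr (List.Sublist.mem hk (List.dropWhile_sublist _))
    · rintro (rfl | hk)
      · exact Or.inl rfl
      · by_cases hkx : k = x
        · exact Or.inl hkx
        · right
          rw [← List.takeWhile_append_dropWhile (p := fun y => y == x) (l := xs)] at hk
          rcases List.mem_append.mp hk with h | h
          · exact absurd (eq_of_beq (List.mem_takeWhile_imp (p := fun y => y == x) h)) hkx
          · exact h

-- keys of groupRuns of a sorted list are strictly increasing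
lemma pairwise_map_fst_groupRuns : ∀ (l : List Int), l.Pairwise (· ≤ ·) →
    ((groupRuns l).map Prod.fst).Pairwise (· < ·) := by
  intro l
  induction l using groupRuns.induct with
  | case1 => intro _; simp [groupRuns]
  | case2 x xs ih =>
    intro hp
    have hle := (List.pairwise_cons.mp hp).1
    have hp' := (List.pairwise_cons.mp hp).2
    have hdwp : (xs.dropWhile (fun y => y == x)).Pairwise (· ≤ ·) :=
      List.Pairwise.sublist (List.dropWhile_sublist _) hp'
    rw [groupRuns]
    simp only [List.map_cons, List.pairwise_cons]
    refine ⟨?_, ih hdwp⟩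
    intro k hk
    exact dropWhile_gt x xs hle hp' k ((mem_map_fst_groupRuns _ k).mp hk)

-- groupRuns of a sorted list lists each key with its count
lemma groupRuns_eq_map_count : ∀ (l : List Int), l.Pairwise (· ≤ ·) →
    groupRuns l = ((groupRuns l).map Prod.fst).map (fun k => (k, (l.count k : Int))) := by
  intro l
  induction l using groupRuns.induct with
  | case1 => intro _; simp [groupRuns]
  | case2 x xs ih =>
    intro hp
    have hle := (List.pairwise_cons.mp hp).1
    have hp' := (List.pairwise_cons.mp hp).2
    have hdwp : (xs.dropWhile (fun y => y == x)).Pairwise (· ≤ ·) :=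
      List.Pairwise.sublist (List.dropWhile_sublist _) hp'
    rw [groupRuns]
    simp only [List.map_cons]
    refine List.cons_eq_cons.mpr ⟨?_, ?_⟩
    · rw [count_head_sorted x xs hle hp']
    · conv_lhs => rw [ih hdwp]
      apply List.map_congr_left
      intro k hk
      have hk' := (mem_map_fst_groupRuns _ k).mp hk
      rw [count_tail_sorted x k xs hle hp' hk']

-- the step of A's counting loop is the Counter step
lemma stepA_eq : (fun (d : PySem.Dict Int Int) (pos : Int) =>
      let d' := if d.contains pos = false then d.insert pos 0 else d
      d'.insert pos (d'.getD pos 0 + 1))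
    = fun (d : PySem.Dict Int Int) (x : Int) => d.insert x (d.getD x 0 + 1) := by
  funext d pos
  show (if d.contains pos = false then d.insert pos 0 else d).insert pos
      ((if d.contains pos = false then d.insert pos 0 else d).getD pos 0 + 1)
    = d.insert pos (d.getD pos 0 + 1)
  by_cases h : d.contains pos = false
  · rw [if_pos h, PySem.Dict.getD_insert_self, PySem.Dict.insert_insert_self,
        PySem.Dict.getD_of_not_contains d 0 h]
  · rw [if_neg h]

-- ===== VERDICT (by name: the statement is the Claim_ definition above) =====
theorem bin_positions_spec : Claim_equal_bin_positions := by
  intro positions _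
  unfold Spec_bin_positions bin_positions bin_positions_alt
  simp only []
  rw [stepA_eq, PySem.Dict.foldl_insert_getD_add_one_eq_counter]
  set l := PySem.List.sorted positions (fun x => x) false with hl
  have hperm : l.Perm positions := PySem.List.sorted_perm positions (fun x => x) false
  have hlp : l.Pairwise (· ≤ ·) := PySem.List.sorted_pairwise positions (fun x => x)
  rw [PySem.Dict.keys_counter]
  set K := (groupRuns l).map Prod.fst with hK
  have hKlt : K.Pairwise (· < ·) := pairwise_map_fst_groupRuns l hlp
  have hKnodup : K.Nodup := hKlt.imp ne_of_lt
  have hKmem : ∀ k, k ∈ K ↔ k ∈ PySem.Set.ofList positions := by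
    intro k
    rw [hK, mem_map_fst_groupRuns, PySem.Set.mem_ofList]
    exact hperm.mem_iff
  have hKperm : K.Perm (PySem.Set.ofList positions) :=
    (List.perm_ext_iff_of_nodup hKnodup (PySem.Set.nodup_ofList positions)).mpr hKmem
  have hsortedK : PySem.List.sorted (PySem.Set.ofList positions) (fun x => x) = K :=
    PySem.List.sorted_eq_of_perm_of_pairwise_lt _ _ _ hKperm hKlt
  rw [hsortedK]
  rw [PySem.Dict.items_foldl_insert_fresh K (fun a => a) _ _
        (fun a _ => PySem.Dict.contains_empty a) (by simpa using hKnodup)]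
  have hemp : (PySem.Dict.empty : PySem.Dict Int Int).items = [] := rfl
  rw [hemp, List.nil_append, groupRuns_eq_map_count l hlp]
  apply List.map_congr_left
  intro k _
  rw [PySem.Dict.getD_counter, hperm.count_eq]
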